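-- pv_equiv track=rewrite | github.com/gjovannj/protein-explorer | app.py | evidenzia_aromatici
-- ===== SOURCE A (Python) =====
-- def evidenzia_aromatici(seq):
--     evidenziata = ""
--     for aa in seq:
--         if aa in ["F", "W", "Y"]:
--             evidenziata += f"<span style='color:red; font-weight:bold'>{aa}</span>"
--         else:
--             evidenziata += aa
--     return f"<div style='font-family: monospace'>{evidenziata}</div>"
-- ===== SOURCE B (Python) =====
-- import re
--
-- def evidenzia_aromatici(seq):
--     corpo = re.sub(
--         "[FWY]",
--         lambda m: f"<span style='color:red; font-weight:bold'>{m.group(0)}</span>",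
--         seq,
--     )
--     return f"<div style='font-family: monospace'>{corpo}</div>"
-- ===== Notes on version B (the rewrite author's own statement) =====
-- stated objective: idiomatic
-- what changed: Replaces the per-character loop with membership test and repeated string concatenation by a single re.sub over the pattern [FWY] with a replacement function.
import Mathlib
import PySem

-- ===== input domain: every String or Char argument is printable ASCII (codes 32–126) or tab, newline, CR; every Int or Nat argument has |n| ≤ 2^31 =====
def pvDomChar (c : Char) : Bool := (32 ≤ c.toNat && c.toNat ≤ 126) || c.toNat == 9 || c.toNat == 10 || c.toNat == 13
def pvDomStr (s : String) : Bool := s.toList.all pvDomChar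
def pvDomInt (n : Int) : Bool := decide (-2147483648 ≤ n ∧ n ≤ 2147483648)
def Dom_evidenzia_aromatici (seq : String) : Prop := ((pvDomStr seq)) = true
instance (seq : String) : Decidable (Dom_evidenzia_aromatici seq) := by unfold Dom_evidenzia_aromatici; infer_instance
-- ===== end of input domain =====

-- B replaces A's per-character loop and string accumulation by a single regex-style
-- substitution pass (re.sub over "[FWY]" with a replacement function); idiomatic, same result.


-- ===== PORT A =====
-- A: loop over the characters, appending either the highlighted span or the bare character
-- to an accumulator string, then wrap in the div (strings handled as List Char, exact on ASCII).
def evidenzia_aromatici (seq : String) : String :=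
  let evidenziata : List Char :=
    seq.toList.foldl (fun acc aa =>
      if aa ∈ ['F', 'W', 'Y'] then
        acc ++ "<span style='color:red; font-weight:bold'>".toList ++ [aa] ++ "</span>".toList
      else
        acc ++ [aa]) []
  String.mk ("<div style='font-family: monospace'>".toList ++ evidenziata ++ "</div>".toList)

-- ===== PORT B =====
-- B: re.sub("[FWY]", repl, seq) — one substitution pass: each char matching the class
-- is replaced by repl(match), every other char is copied; hand-ported, exact.
def pvReplFWY (c : Char) : List Char :=
  "<span style='color:red; font-weight:bold'>".toList ++ [c] ++ "</span>".toList

def pvSubFWY (cs : List Char) : List Char :=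
  cs.flatMap (fun c => if c = 'F' ∨ c = 'W' ∨ c = 'Y' then pvReplFWY c else [c])

def evidenzia_aromatici_alt (seq : String) : String :=
  String.mk ("<div style='font-family: monospace'>".toList ++ pvSubFWY seq.toList ++ "</div>".toList)

-- ===== PRECONDITION & SPEC =====
def Spec_evidenzia_aromatici (seq : String) (out : String) : Prop := out = evidenzia_aromatici_alt seq
instance (seq : String) (out : String) : Decidable (Spec_evidenzia_aromatici seq out) := by unfold Spec_evidenzia_aromatici; infer_instance

-- ===== CLAIM (what is proved, stated in full; the proofs are below) =====
def Claim_equal_evidenzia_aromatici : Prop := ∀ (seq : String), Dom_evidenzia_aromatici seq → Spec_evidenzia_aromatici seq (evidenzia_aromatici seq)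

-- ===== LEMMAS AND PROOFS =====

-- A's loop body, with the append pulled out of the branch, is exactly B's flatMap step.
theorem pvFoldEqSub (cs : List Char) :
    cs.foldl (fun acc aa =>
      if aa ∈ ['F', 'W', 'Y'] then
        acc ++ "<span style='color:red; font-weight:bold'>".toList ++ [aa] ++ "</span>".toList
      else
        acc ++ [aa]) [] = pvSubFWY cs := by
  have h : ∀ acc : List Char,
      cs.foldl (fun acc aa =>
        if aa ∈ ['F', 'W', 'Y'] then
          acc ++ "<span style='color:red; font-weight:bold'>".toList ++ [aa] ++ "</span>".toList
        else
          acc ++ [aa]) acc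
      = acc ++ pvSubFWY cs := by
    intro acc
    have : cs.foldl (fun acc aa =>
        acc ++ (if aa = 'F' ∨ aa = 'W' ∨ aa = 'Y' then pvReplFWY aa else [aa])) acc
        = acc ++ pvSubFWY cs := by
      simpa [pvSubFWY] using
        PySem.List.foldl_append_eq_flatMap
          (g := fun aa => if aa = 'F' ∨ aa = 'W' ∨ aa = 'Y' then pvReplFWY aa else [aa])
          (l := cs) (acc := acc)
    rw [← this]
    congr 1
    funext a b
    by_cases hb : b = 'F' ∨ b = 'W' ∨ b = 'Y' <;>
      simp [hb, pvReplFWY, List.append_assoc]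
  simpa using h []

-- ===== VERDICT (by name: the statement is the Claim_ definition above) =====
theorem evidenzia_aromatici_spec : Claim_equal_evidenzia_aromatici := by
  intro seq _
  unfold Spec_evidenzia_aromatici evidenzia_aromatici evidenzia_aromatici_alt
  rw [pvFoldEqSub]
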